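-- pv_equiv track=rewrite | github.com/WeiqingYuGT/pyhmm | hmm_util.py | state_change_segment
-- ===== SOURCE A (Python) =====
-- def state_change_segment(states, cut):
--     def smap(s):
--         return int(s > cut)
--     res = [[smap(states[0]),0]]
--     for i in range(1,len(states)):
--         s = states[i]
--         if smap(s)!=res[-1][0]:
--             res[-1][1] = i-1
--             res.append([smap(s),0])
--     res[-1][1] = len(states)-1
--     return res
-- ===== SOURCE B (Python) =====
-- def state_change_segment(states, cut):
--     m = [int(s > cut) for s in states]
--
--     def seg(lo, hi):
--         # segments of m[lo:hi] as [value, last_index] pairs, by divide and conquer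
--         if hi - lo == 1:
--             return [[m[lo], lo]]
--         mid = (lo + hi) // 2
--         left = seg(lo, mid)
--         right = seg(mid, hi)
--         if left[-1][0] == right[0][0]:
--             return left[:-1] + right
--         return left + right
--
--     return seg(0, len(m))
-- ===== Notes on version B (the rewrite author's own statement) =====
-- stated objective: alternative
-- what changed: Replaces A's stateful left-to-right scan that patches the last result entry in place by a divide-and-conquer recursion: map to binary, recursively segment each half, and merge the two halves by fusing the boundary runs when their values agree.
import Mathlib
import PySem

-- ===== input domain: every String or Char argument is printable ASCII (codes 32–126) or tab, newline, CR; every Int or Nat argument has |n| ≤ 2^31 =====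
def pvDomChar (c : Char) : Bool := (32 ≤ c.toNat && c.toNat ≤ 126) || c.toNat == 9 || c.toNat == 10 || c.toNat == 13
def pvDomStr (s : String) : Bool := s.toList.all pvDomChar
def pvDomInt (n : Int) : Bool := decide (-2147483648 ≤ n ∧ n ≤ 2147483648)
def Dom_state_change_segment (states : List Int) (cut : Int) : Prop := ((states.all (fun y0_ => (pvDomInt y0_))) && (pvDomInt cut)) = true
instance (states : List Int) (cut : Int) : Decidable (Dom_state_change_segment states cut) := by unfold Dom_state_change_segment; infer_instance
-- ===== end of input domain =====

-- B replaces A's stateful scan (which patches the last result entry in place) by a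
-- divide-and-conquer recursion that segments each half and fuses the boundary runs;
-- objective: alternative.

-- ===== PORT A =====
def smapA (cut s : Int) : Int := if s > cut then 1 else 0

-- res[-1][1] = x  (set field 1 of the last entry)
def patchLast (res : List (List Int)) (x : Int) : List (List Int) :=
  match res with
  | [] => []
  | [l] => [l.set 1 x]
  | h :: t => h :: patchLast t x

-- res[-1][0]
def lastHead (res : List (List Int)) : Int := (res.getLastD []).headD 0

def stepA (states : List Int) (cut : Int) (res : List (List Int)) (i : Int) : List (List Int) :=
  let s := PySem.List.pyGetD states i 0
  if smapA cut s != lastHead res then patchLast res (i - 1) ++ [[smapA cut s, 0]] else res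

def state_change_segment (states : List Int) (cut : Int) : List (List Int) :=
  let res0 := [[smapA cut (PySem.List.pyGetD states 0 0), 0]]
  let res := (PySem.List.pyRange 1 (states.length : Int) 1).foldl (stepA states cut) res0
  patchLast res ((states.length : Int) - 1)

-- ===== PORT B =====
-- seg(lo, hi): segments of m[lo:hi]; indices are in-range naturals, so m[lo] is m.getD lo 0
def segB (m : List Int) (lo hi : Nat) : List (List Int) :=
  if hi - lo = 1 then [[m.getD lo 0, (lo : Int)]]
  else if _h : lo + 1 < hi then
    let mid := (lo + hi) / 2
    let left := segB m lo mid
    let right := segB m mid hi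
    if (left.getLastD []).headD 0 = (right.headD []).headD 0 then left.dropLast ++ right
    else left ++ right
  else []   -- unreachable: seg is only called with lo < hi (Python would not terminate otherwise)
termination_by hi - lo
decreasing_by all_goals omega

def state_change_segment_alt (states : List Int) (cut : Int) : List (List Int) :=
  let m := states.map (fun s => if s > cut then (1 : Int) else 0)
  segB m 0 m.length

-- ===== PRECONDITION & SPEC =====
-- Python A raises IndexError on the empty list (states[0]); B also fails to return there
-- (its recursion does not terminate on an empty range), so the empty list is excluded.
def Pre_state_change_segment (states : List Int) (cut : Int) : Prop := states ≠ []
instance (states : List Int) (cut : Int) : Decidable (Pre_state_change_segment states cut) := by unfold Pre_state_change_segment; infer_instance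
def pvWitness_state_change_segment : List Int × Int := ([1, 3, 2], 2)

def Spec_state_change_segment (states : List Int) (cut : Int) (out : List (List Int)) : Prop := out = state_change_segment_alt states cut
instance (states : List Int) (cut : Int) (out : List (List Int)) : Decidable (Spec_state_change_segment states cut out) := by unfold Spec_state_change_segment; infer_instance

-- ===== CLAIM (what is proved, stated in full; the proofs are below) =====
def Claim_equal_state_change_segment : Prop := ∀ (states : List Int) (cut : Int), Dom_state_change_segment states cut → Pre_state_change_segment states cut → Spec_state_change_segment states cut (state_change_segment states cut)

-- ===== LEMMAS AND PROOFS =====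

-- common reference function: current run value v, index of last consumed element i, rest of mapped list
def segs (v : Int) (i : Int) (m : List Int) : List (List Int) :=
  match m with
  | [] => [[v, i]]
  | x :: xs => if x = v then segs v (i + 1) xs else [v, i] :: segs x (i + 1) xs

theorem patchLast_append (v e x : Int) :
    ∀ (pre : List (List Int)), patchLast (pre ++ [[v, e]]) x = pre ++ [[v, x]]
  | [] => by simp [patchLast, List.set]
  | h :: t => by
    cases t with
    | nil => simp [patchLast, List.set]
    | cons h' t' => simpa [patchLast] using patchLast_append v e x (h' :: t')

theorem lastHead_append (pre : List (List Int)) (v e : Int) :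
    lastHead (pre ++ [[v, e]]) = v := by
  simp [lastHead]

theorem pyGetD_drop (states : List Int) (k : Nat) (x : Int) (xs : List Int)
    (h : states.drop k = x :: xs) :
    PySem.List.pyGetD states (k : Int) 0 = x := by
  have hx : states[k]? = some x := by
    rw [← List.head?_drop, h]; rfl
  simp only [PySem.List.pyGetD_natCast]
  simp [List.getD_eq_getElem?_getD, hx]

-- A-side invariant
theorem foldA (states : List Int) (cut : Int) :
    ∀ (xs : List Int) (k : Nat) (pre : List (List Int)) (v : Int),
      1 ≤ k → k ≤ states.length → states.drop k = xs →
      patchLast ((PySem.List.pyRange (k : Int) (states.length : Int) 1).foldl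
          (stepA states cut) (pre ++ [[v, 0]])) ((states.length : Int) - 1)
        = pre ++ segs v ((k : Int) - 1) (xs.map (smapA cut)) := by
  intro xs
  induction xs with
  | nil =>
    intro k pre v hk hkle hdrop
    have hkn : states.length ≤ k := List.drop_eq_nil_iff.mp hdrop
    have hkeq : k = states.length := by omega
    rw [PySem.List.pyRange_one_eq_nil (by exact_mod_cast hkn)]
    simp [segs, patchLast_append, hkeq]
  | cons x xs ih =>
    intro k pre v hk hkle hdrop
    have hklt : k < states.length := by
      by_contra hge
      simp [List.drop_eq_nil_of_le (le_of_not_gt hge)] at hdrop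
    have hdrop' : states.drop (k + 1) = xs := by
      have := congrArg (List.drop 1) hdrop
      simpa [List.drop_drop, Nat.add_comm] using this
    rw [PySem.List.pyRange_one_cons (by exact_mod_cast hklt)]
    rw [List.foldl_cons]
    have hx : PySem.List.pyGetD states (k : Int) 0 = x := pyGetD_drop states k x xs hdrop
    have hcast : ((k : Int) + 1) = ((k + 1 : Nat) : Int) := by push_cast; ring
    have hcast2 : ((k + 1 : Nat) : Int) - 1 = ((k : Int) - 1) + 1 := by push_cast; ring
    by_cases hcase : smapA cut x = v
    · have hstep : stepA states cut (pre ++ [[v, 0]]) (k : Int) = pre ++ [[v, 0]] := by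
        simp [stepA, hx, lastHead_append, hcase]
      rw [hstep, hcast, ih (k + 1) pre v (by omega) (by omega) hdrop', hcast2]
      simp [segs, hcase]
    · have hstep : stepA states cut (pre ++ [[v, 0]]) (k : Int)
          = (pre ++ [[v, (k : Int) - 1]]) ++ [[smapA cut x, 0]] := by
        simp [stepA, hx, lastHead_append, hcase, patchLast_append]
      rw [hstep, hcast,
        ih (k + 1) (pre ++ [[v, (k : Int) - 1]]) (smapA cut x) (by omega) (by omega) hdrop',
        hcast2]
      simp [segs, hcase]

-- B-side lemmas
theorem segs_ne_nil (v i : Int) : ∀ (m : List Int), segs v i m ≠ []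
  | [] => by simp [segs]
  | x :: xs => by
    by_cases h : x = v <;> simp [segs, h, segs_ne_nil _ _ xs]

theorem segs_firstVal (v : Int) : ∀ (m : List Int) (i : Int),
    ((segs v i m).headD []).headD 0 = v
  | [], i => by simp [segs]
  | x :: xs, i => by
    by_cases h : x = v
    · simpa [segs, h] using segs_firstVal v xs (i + 1)
    · simp [segs, h]

theorem dropLast_cons_of_ne_nil {α : Type} (a : α) {t : List α} (h : t ≠ []) :
    (a :: t).dropLast = a :: t.dropLast := by
  cases t with
  | nil => exact absurd rfl h
  | cons b t' => rfl

theorem getLastD_cons_of_ne_nil {α : Type} (a d : α) {t : List α} (h : t ≠ []) :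
    (a :: t).getLastD d = t.getLastD d := by
  cases t with
  | nil => exact absurd rfl h
  | cons b t' => rfl

-- merge lemma: segments of a concatenation, fusing at the boundary when values agree
theorem segs_append (w : Int) (zs : List Int) : ∀ (ys : List Int) (v i : Int),
    segs v i (ys ++ w :: zs)
      = if ((segs v i ys).getLastD []).headD 0 = w
        then (segs v i ys).dropLast ++ segs w (i + (ys.length : Int) + 1) zs
        else segs v i ys ++ segs w (i + (ys.length : Int) + 1) zs
  | [], v, i => by
    by_cases h : w = v
    · subst h; simp [segs]
    · have h' : ¬ v = w := fun hh => h hh.symm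
      simp [segs, h, h']
  | y :: ys, v, i => by
    by_cases hy : y = v
    · rw [show (y :: ys) ++ w :: zs = y :: (ys ++ w :: zs) from rfl]
      rw [show segs v i (y :: (ys ++ w :: zs)) = segs v (i + 1) (ys ++ w :: zs) from by
        simp [segs, hy]]
      rw [segs_append w zs ys v (i + 1)]
      rw [show segs v i (y :: ys) = segs v (i + 1) ys from by simp [segs, hy]]
      have : i + 1 + (ys.length : Int) + 1 = i + ((ys.length : Nat) + 1 : Nat) + 1 := by
        push_cast; ring
      simp only [List.length_cons, this]
    · rw [show (y :: ys) ++ w :: zs = y :: (ys ++ w :: zs) from rfl]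
      rw [show segs v i (y :: (ys ++ w :: zs))
            = [v, i] :: segs y (i + 1) (ys ++ w :: zs) from by simp [segs, hy]]
      rw [segs_append w zs ys y (i + 1)]
      rw [show segs v i (y :: ys) = [v, i] :: segs y (i + 1) ys from by simp [segs, hy]]
      have hne := segs_ne_nil y (i + 1) ys
      rw [getLastD_cons_of_ne_nil _ _ hne]
      have : i + 1 + (ys.length : Int) + 1 = i + ((ys.length : Nat) + 1 : Nat) + 1 := by
        push_cast; ring
      simp only [List.length_cons, ← this]
      split_ifs with hc
      · rw [dropLast_cons_of_ne_nil _ hne, List.cons_append]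
      · rw [List.cons_append]

-- splitting the window m[lo+1:hi] at an interior index mid
theorem window_split (m : List Int) (lo mid hi : Nat)
    (h1 : lo + 1 ≤ mid) (h2 : mid < hi) (h3 : hi ≤ m.length) :
    (m.drop (lo + 1)).take (hi - lo - 1)
      = (m.drop (lo + 1)).take (mid - lo - 1)
        ++ m.getD mid 0 :: (m.drop (mid + 1)).take (hi - mid - 1) := by
  have hmidlt : mid < m.length := by omega
  have hsum : hi - lo - 1 = (mid - lo - 1) + (hi - mid) := by omega
  rw [hsum, List.take_add]
  congr 1
  rw [List.drop_drop]
  have : lo + 1 + (mid - lo - 1) = mid := by omega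
  rw [this]
  rw [List.drop_eq_getElem_cons hmidlt]
  have hg : m.getD mid 0 = m[mid] := by
    simp [List.getD_eq_getElem?_getD, List.getElem?_eq_getElem hmidlt]
  rw [hg]
  have hhm : hi - mid = (hi - mid - 1) + 1 := by omega
  rw [hhm, List.take_succ_cons]
  norm_num

-- B-side invariant: segB computes the reference segmentation of the window m[lo:hi]
theorem segB_eq (m : List Int) : ∀ (n lo hi : Nat), hi - lo ≤ n → lo < hi → hi ≤ m.length →
    segB m lo hi = segs (m.getD lo 0) (lo : Int) ((m.drop (lo + 1)).take (hi - lo - 1)) := by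
  intro n
  induction n with
  | zero => intro lo hi hle hlt _; omega
  | succ n ih =>
    intro lo hi hle hlt hlen
    by_cases hbase : hi - lo = 1
    · rw [segB]
      have h0 : hi - lo - 1 = 0 := by omega
      rw [h0]
      simp [hbase, segs]
    · have h2 : lo + 1 < hi := by omega
      rw [segB]
      simp only [hbase, if_false, h2, dif_pos]
      set mid := (lo + hi) / 2 with hmid
      have hlomid : lo < mid := by omega
      have hmidhi : mid < hi := by omega
      rw [ih lo mid (by omega) hlomid (by omega), ih mid hi (by omega) hmidhi hlen]
      rw [segs_firstVal]
      rw [window_split m lo mid hi (by omega) hmidhi hlen]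
      rw [segs_append (m.getD mid 0) ((m.drop (mid + 1)).take (hi - mid - 1))
            ((m.drop (lo + 1)).take (mid - lo - 1)) (m.getD lo 0) (lo : Int)]
      have hlenWl : ((m.drop (lo + 1)).take (mid - lo - 1)).length = mid - lo - 1 := by
        rw [List.length_take, List.length_drop]
        omega
      rw [hlenWl]
      have : (lo : Int) + ((mid - lo - 1 : Nat) : Int) + 1 = (mid : Nat) := by omega
      rw [this]

-- ===== VERDICT (by name: the statement is the Claim_ definition above) =====
theorem state_change_segment_spec : Claim_equal_state_change_segment := by
  intro states cut _ hpre
  unfold Spec_state_change_segment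
  cases states with
  | nil => exact absurd rfl hpre
  | cons x rest =>
    unfold state_change_segment state_change_segment_alt
    have hA := foldA (x :: rest) cut rest 1 [] (smapA cut x) (by omega) (by simp) (by simp)
    simp only [Nat.cast_one, List.nil_append] at hA
    have hx0 : PySem.List.pyGetD (x :: rest) (0 : Int) 0 = x := by
      simp [PySem.List.pyGetD_zero_cons]
    simp only [hx0]
    rw [hA]
    set m := (x :: rest).map (fun s => if s > cut then (1 : Int) else 0) with hm
    have hmlen : m.length = rest.length + 1 := by simp [hm]
    have hB := segB_eq m (m.length) 0 m.length (by omega) (by omega) (by omega)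
    rw [hB]
    have hget0 : m.getD 0 0 = smapA cut x := by simp [hm, smapA]
    have hdrop : m.drop 1 = rest.map (smapA cut) := by
      simp [hm, smapA]
    have htake : (m.drop 1).take (m.length - 0 - 1) = rest.map (smapA cut) := by
      rw [hdrop, hmlen]
      simp
    rw [show (0 : Nat) + 1 = 1 from rfl, htake, hget0]
    norm_num
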